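-- pv_equiv track=rewrite | github.com/lukecui95/Purchase-Analytics | src/purchase_analytics.py | check_products
-- ===== SOURCE A (Python) =====
-- def check_products(products_id):
--     a = products_id[1:]
--     temp = 0
--     count = 0
--     flag = 0
--     for i in range(len(a)-1):
--         temp = int(a[i+1])-int(a[i])
--         count += temp
--     flag = count == int(a[len(a)-1])-1
--     return flag
-- ===== SOURCE B (Python) =====
-- def check_products(products_id):
--     # Telescoping: sum of consecutive differences of products_id[1:] equals
--     # last - first, so A's check collapses to "second element == 1".
--     return int(products_id[1]) == 1
-- ===== Notes on version B (the rewrite author's own statement) =====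
-- stated objective: faster
-- what changed: The consecutive-difference loop telescopes to last-first, so the whole check collapses to a single O(1) comparison products_id[1] == 1.
-- outside the precondition, e.g. on check_products([1]): A raises IndexError, B raises IndexError
import Mathlib
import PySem

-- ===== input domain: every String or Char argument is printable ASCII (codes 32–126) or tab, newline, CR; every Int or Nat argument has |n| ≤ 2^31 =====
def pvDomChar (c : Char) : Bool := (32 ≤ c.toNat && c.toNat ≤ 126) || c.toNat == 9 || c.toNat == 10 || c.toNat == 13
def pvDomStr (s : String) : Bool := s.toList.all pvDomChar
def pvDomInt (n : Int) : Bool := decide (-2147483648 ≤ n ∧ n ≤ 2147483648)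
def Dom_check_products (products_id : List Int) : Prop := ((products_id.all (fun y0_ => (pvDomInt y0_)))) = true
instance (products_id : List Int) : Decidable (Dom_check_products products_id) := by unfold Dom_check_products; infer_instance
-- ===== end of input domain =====

-- B collapses A's consecutive-difference loop (which telescopes to last-first) to the O(1) check products_id[1] == 1.


-- ===== PORT A =====
def check_products (products_id : List Int) : Bool :=
  let a := PySem.List.slice products_id (some 1) none
  let count := (PySem.List.pyRange 0 ((a.length : Int) - 1) 1).foldl
    (fun count i => count + (PySem.List.pyGetD a (i + 1) 0 - PySem.List.pyGetD a i 0)) 0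
  decide (count = PySem.List.pyGetD a ((a.length : Int) - 1) 0 - 1)

-- ===== PORT B =====
def check_products_alt (products_id : List Int) : Bool :=
  decide (PySem.List.pyGetD products_id 1 0 = 1)

-- ===== PRECONDITION & SPEC =====
-- Pre_ excludes lists of length < 2, on which A raises IndexError (a[-1] of the empty slice a = products_id[1:]).
def Pre_check_products (products_id : List Int) : Prop := 2 ≤ products_id.length
instance (products_id : List Int) : Decidable (Pre_check_products products_id) := by unfold Pre_check_products; infer_instance
def pvWitness_check_products : List Int := [0, 1, 2]
def Spec_check_products (products_id : List Int) (out : Bool) : Prop := out = check_products_alt products_id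
instance (products_id : List Int) (out : Bool) : Decidable (Spec_check_products products_id out) := by unfold Spec_check_products; infer_instance

-- ===== CLAIM (what is proved, stated in full; the proofs are below) =====
def Claim_equal_check_products : Prop := ∀ (products_id : List Int), Dom_check_products products_id → Pre_check_products products_id → Spec_check_products products_id (check_products products_id)

-- ===== LEMMAS AND PROOFS =====

-- Telescoping: the fold of consecutive differences over range(0, m) is a[m] - a[0].
theorem pv_tele (a : List Int) (m : Nat) (hm : m < a.length) :
    (PySem.List.pyRange 0 (m : Int) 1).foldl
      (fun c i => c + (PySem.List.pyGetD a (i + 1) 0 - PySem.List.pyGetD a i 0)) 0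
    = PySem.List.pyGetD a (m : Int) 0 - PySem.List.pyGetD a 0 0 := by
  induction m with
  | zero => simp [PySem.List.pyRange_one_eq_nil]
  | succ k ih =>
    have hk : k < a.length := Nat.lt_of_succ_lt hm
    have hr : PySem.List.pyRange 0 ((k + 1 : Nat) : Int) 1
        = PySem.List.pyRange 0 (k : Nat) 1 ++ [(k : Int)] := by
      have := PySem.List.pyRange_one_succ_right (a := 0) (b := (k : Int)) (by positivity)
      push_cast
      push_cast at this
      exact this
    rw [hr, List.foldl_append, ih hk]
    push_cast
    simp

-- ===== VERDICT (by name: the statement is the Claim_ definition above) =====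
theorem check_products_spec : Claim_equal_check_products := by
  intro products_id _ hpre
  unfold Pre_check_products at hpre
  unfold Spec_check_products check_products check_products_alt
  match products_id, hpre with
  | x :: y :: rest, _ =>
    simp only [PySem.List.slice_from_one, List.tail_cons]
    set a := y :: rest with ha
    have hlen : 1 ≤ a.length := by simp [ha]
    have hcast : ((a.length : Int) - 1) = ((a.length - 1 : Nat) : Int) := by omega
    rw [hcast, pv_tele a (a.length - 1) (by omega)]
    have h0 : PySem.List.pyGetD a 0 0 = y := by simp [ha, PySem.List.pyGetD_zero_cons]
    have h1 : PySem.List.pyGetD (x :: a) 1 0 = y := by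
      rw [show (1 : Int) = ((1 : Nat) : Int) from rfl, PySem.List.pyGetD_natCast]
      simp [ha]
    rw [h0, h1]
    simp only [decide_eq_decide]
    omega
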